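-- pv_equiv track=rewrite | github.com/hash123h/Google_Foobar | Minion_Labor_shifts.py | solution
-- ===== SOURCE A (Python) =====
-- def solution(data, n):
--   iMap = {};
--   for idx, val in enumerate(data):
--     if val in iMap:
--       iMap[val].append(idx)
--     else:
--       iMap[val] = [idx]
--   ret = []
--   for val in data:
--     indices = iMap[val]
--     if len(indices)<=n:
--       ret.append(val)
--
--   return ret
-- ===== SOURCE B (Python) =====
-- def solution(data, n):
--   # Sort-based grouping instead of a value->indices dict: stable-sort the
--   # (index, value) pairs by value so equal values form contiguous runs,
--   # keep the index runs of length <= n, then sort the kept indices to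
--   # restore the original order.
--   pairs = sorted(enumerate(data), key=lambda p: p[1])
--   keep = []
--   i = 0
--   while i < len(pairs):
--     j = i + 1
--     while j < len(pairs) and pairs[j][1] == pairs[i][1]:
--       j += 1
--     if j - i <= n:
--       keep.extend(p[0] for p in pairs[i:j])
--     i = j
--   keep.sort()
--   return [data[k] for k in keep]
-- ===== Notes on version B (the rewrite author's own statement) =====
-- stated objective: alternative
-- what changed: Replaces A's value-to-indices dict plus a second per-element pass with sort-based grouping: stable-sort (index, value) pairs by value, scan the contiguous runs of equal values, keep whole index runs of length <= n, and sort the kept indices to restore the original order.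
import Mathlib
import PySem

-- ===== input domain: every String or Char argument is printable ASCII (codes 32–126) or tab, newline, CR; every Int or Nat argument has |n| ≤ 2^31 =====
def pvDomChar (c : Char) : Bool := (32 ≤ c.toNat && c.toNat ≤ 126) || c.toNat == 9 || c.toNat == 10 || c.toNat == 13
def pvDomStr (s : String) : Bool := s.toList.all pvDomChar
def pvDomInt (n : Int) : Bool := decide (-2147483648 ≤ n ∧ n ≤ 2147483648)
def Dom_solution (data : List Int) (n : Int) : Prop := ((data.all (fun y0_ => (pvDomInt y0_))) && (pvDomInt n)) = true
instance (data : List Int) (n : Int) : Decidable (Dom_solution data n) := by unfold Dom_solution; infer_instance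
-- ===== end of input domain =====

-- B replaces A's value→indices dict + second per-element pass by sort-based grouping:
-- stable-sort (index, value) pairs by value, keep whole contiguous runs of length ≤ n,
-- sort the kept indices to restore the original order.

-- ===== PORT A =====
-- dict build loop: 'if val in iMap: iMap[val].append(idx) else: iMap[val] = [idx]'
def solutionStep (d : PySem.Dict Int (List Int)) (p : Int × Int) : PySem.Dict Int (List Int) :=
  if d.contains p.2 then d.modify p.2 [] (· ++ [p.1]) else d.insert p.2 [p.1]

def solution (data : List Int) (n : Int) : List Int :=
  let iMap := (PySem.List.enumerate data 0).foldl solutionStep PySem.Dict.empty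
  data.foldl (fun ret val =>
    let indices := iMap.getD val []
    if (indices.length : Int) ≤ n then ret ++ [val] else ret) []

-- ===== PORT B =====
-- outer while over run starts; the inner 'while j < len(pairs) and pairs[j][1] == pairs[i][1]'
-- splits off the contiguous run of the head's value (the takeWhile/dropWhile split at i..j)
def solutionRuns (n : Int) : List (Int × Int) → List Int
  | [] => []
  | p :: rest =>
    (if ((rest.takeWhile (fun q => q.2 == p.2)).length : Int) + 1 ≤ n
      then (p :: rest.takeWhile (fun q => q.2 == p.2)).map (·.1) else [])
      ++ solutionRuns n (rest.dropWhile (fun q => q.2 == p.2))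
  termination_by l => l.length
  decreasing_by simpa using Nat.lt_succ_of_le (List.length_dropWhile_le _ _)

def solution_alt (data : List Int) (n : Int) : List Int :=
  let pairs := PySem.List.sorted (PySem.List.enumerate data 0) (·.2) false
  let keep := solutionRuns n pairs
  -- data[k] with k a kept enumerate index (always in range): pyGetD is exact there
  (PySem.List.sorted keep (fun i => i) false).map (fun i => PySem.List.pyGetD data i 0)

-- ===== PRECONDITION & SPEC =====
def Spec_solution (data : List Int) (n : Int) (out : List Int) : Prop := out = solution_alt data n
instance (data : List Int) (n : Int) (out : List Int) : Decidable (Spec_solution data n out) := by unfold Spec_solution; infer_instance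

-- ===== CLAIM (what is proved, stated in full; the proofs are below) =====
def Claim_equal_solution : Prop := ∀ (data : List Int) (n : Int), Dom_solution data n → Spec_solution data n (solution data n)

-- ===== LEMMAS AND PROOFS =====

-- A-side: the dict maps each value to all its indices, so getD-length is the count
theorem getD_solutionStep (d : PySem.Dict Int (List Int)) (p : Int × Int) (v : Int) :
    (solutionStep d p).getD v [] = if v = p.2 then d.getD v [] ++ [p.1] else d.getD v [] := by
  unfold solutionStep
  by_cases h : d.contains p.2
  · simp [h, PySem.Dict.getD_modify]
    split_ifs with hv
    · subst hv; rfl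
    · rfl
  · simp only [h, Bool.false_eq_true, if_false, PySem.Dict.getD_insert]
    split_ifs with hv
    · subst hv
      rw [PySem.Dict.getD_of_not_contains _ _ (by simpa using h)]
      rfl
    · rfl

theorem length_getD_foldl (l : List (Int × Int)) (d : PySem.Dict Int (List Int)) (v : Int) :
    ((l.foldl solutionStep d).getD v []).length
      = (d.getD v []).length + (l.map (·.2)).count v := by
  induction l generalizing d with
  | nil => simp
  | cons p rest ih =>
    simp only [List.foldl_cons, List.map_cons, ih, getD_solutionStep]
    by_cases hv : v = p.2
    · simp [hv]
      omega
    · simp [hv, Ne.symm hv]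

theorem length_getD_build (data : List Int) (v : Int) :
    (((PySem.List.enumerate data 0).foldl solutionStep PySem.Dict.empty).getD v []).length
      = data.count v := by
  rw [length_getD_foldl, PySem.List.map_snd_enumerate]
  simp

-- A computes filter by count
theorem solution_eq_filter (data : List Int) (n : Int) :
    solution data n = data.filter (fun x => ((data.count x : Int) ≤ n : Bool)) := by
  unfold solution
  rw [PySem.List.foldl_append_ite_eq_filter]
  simp only [List.nil_append]
  apply List.filter_congr
  intro x _
  simp [length_getD_build]

-- the target index list: indices (in order) whose value occurs at most n times
def targetIdx (data : List Int) (n : Int) : List Int :=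
  ((PySem.List.enumerate data 0).filter (fun p => ((data.count p.2 : Int) ≤ n : Bool))).map (·.1)

theorem pairwise_lt_targetIdx (data : List Int) (n : Int) :
    (targetIdx data n).Pairwise (· < ·) :=
  List.Pairwise.map _ (fun _ _ h => h)
    ((PySem.List.pairwise_lt_enumerate data 0).sublist List.filter_sublist)

theorem mem_targetIdx (data : List Int) (n i : Int) :
    i ∈ targetIdx data n ↔ ∃ (k : Nat) (h : k < data.length), i = (k : Int) ∧ (data.count data[k] : Int) ≤ n := by
  unfold targetIdx
  simp only [List.mem_map, List.mem_filter, PySem.List.mem_enumerate_iff]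
  constructor
  · rintro ⟨p, ⟨⟨k, hk, rfl⟩, hv⟩, rfl⟩
    exact ⟨k, hk, by simp, by simpa using hv⟩
  · rintro ⟨k, hk, rfl, hc⟩
    exact ⟨((k : Int), data[k]), ⟨⟨k, hk, by simp⟩, by simpa⟩, rfl⟩

-- B-side: in a pair list sorted by value, everything after the head's run is strictly larger
theorem lt_of_mem_dropWhile_run (p : Int × Int) (rest : List (Int × Int))
    (hs : (p :: rest).Pairwise (fun a b => a.2 ≤ b.2)) :
    ∀ q ∈ rest.dropWhile (fun q => q.2 == p.2), p.2 < q.2 := by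
  intro q hq
  rcases hr : rest.dropWhile (fun q => q.2 == p.2) with _ | ⟨h, t⟩
  · rw [hr] at hq; simp at hq
  · have hhead : ¬ ((h.2 == p.2) = true) := by
      have := List.head_dropWhile_not (fun q => q.2 == p.2) (l := rest) (by rw [hr]; simp)
      simp only [hr, List.head_cons] at this
      simp [this]
    have hrest : ∀ x ∈ rest, p.2 ≤ x.2 := (List.pairwise_cons.1 hs).1
    have hmemh : h ∈ rest := (List.dropWhile_sublist _).mem (hr ▸ List.mem_cons_self)
    have hph : p.2 < h.2 := lt_of_le_of_ne (hrest h hmemh) (fun e => hhead (by simp [e.symm]))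
    rw [hr] at hq
    rcases List.mem_cons.1 hq with rfl | hqt
    · exact hph
    · have hpw : (h :: t).Pairwise (fun a b => a.2 ≤ b.2) :=
        hr ▸ ((List.pairwise_cons.1 hs).2.sublist (List.dropWhile_sublist _))
      exact lt_of_lt_of_le hph ((List.pairwise_cons.1 hpw).1 q hqt)

-- the kept indices are a subsequence of the pair list's first components
theorem solutionRuns_sublist (n : Int) (l : List (Int × Int)) :
    (solutionRuns n l).Sublist (l.map (·.1)) := by
  induction l using solutionRuns.induct with
  | case1 => simp [solutionRuns]
  | case2 p rest ih =>
    rw [solutionRuns]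
    have hdecomp : p :: rest
        = p :: (rest.takeWhile (fun q => q.2 == p.2) ++ rest.dropWhile (fun q => q.2 == p.2)) := by
      rw [List.takeWhile_append_dropWhile]
    conv_rhs => rw [hdecomp]
    simp only [List.map_cons, List.map_append]
    split_ifs with hc
    · simp only [List.cons_append]
      exact (List.cons_sublist_cons).2 (ih.append_left _)
    · simp only [List.nil_append]
      exact ((List.sublist_append_of_sublist_right ih).cons _)

-- membership in the kept indices of a value-sorted pair list: whole runs of length ≤ n
theorem mem_solutionRuns (n : Int) (l : List (Int × Int))
    (hs : l.Pairwise (fun a b => a.2 ≤ b.2)) (i : Int) :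
    i ∈ solutionRuns n l
      ↔ ∃ p ∈ l, p.1 = i ∧ ((l.countP (fun q => q.2 == p.2) : Int) ≤ n) := by
  revert hs i
  induction l using solutionRuns.induct with
  | case1 => intro _ i; simp [solutionRuns]
  | case2 p rest ih =>
    intro hs i
    have hdecomp : rest = rest.takeWhile (fun q => q.2 == p.2) ++ rest.dropWhile (fun q => q.2 == p.2) :=
      (List.takeWhile_append_dropWhile).symm
    have hgrp : ∀ q ∈ rest.takeWhile (fun q => q.2 == p.2), q.2 = p.2 := fun q hq => by
      simpa using List.mem_takeWhile_imp hq
    have hrest' : ∀ q ∈ rest.dropWhile (fun q => q.2 == p.2), p.2 < q.2 :=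
      lt_of_mem_dropWhile_run p rest hs
    have hs' : (rest.dropWhile (fun q => q.2 == p.2)).Pairwise (fun a b => a.2 ≤ b.2) :=
      ((List.pairwise_cons.1 hs).2).sublist (List.dropWhile_sublist _)
    -- count of a value v in the whole list
    have hcount : ∀ v : Int, (p :: rest).countP (fun q => q.2 == v)
        = (if p.2 = v then 1 else 0)
          + (rest.takeWhile (fun q => q.2 == p.2)).countP (fun q => q.2 == v)
          + (rest.dropWhile (fun q => q.2 == p.2)).countP (fun q => q.2 == v) := by
      intro v
      rw [List.countP_cons]
      conv_lhs => rw [hdecomp]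
      rw [List.countP_append]
      by_cases hv : p.2 = v
      · simp [hv]
        omega
      · simp [hv]
    have hcount_head : (p :: rest).countP (fun q => q.2 == p.2)
        = (rest.takeWhile (fun q => q.2 == p.2)).length + 1 := by
      rw [hcount p.2, List.countP_eq_length_filter, List.filter_eq_self.2 (fun q hq => by simp [hgrp q hq]),
        List.countP_eq_length_filter, List.filter_eq_nil_iff.2
          (fun q hq => by simpa using (ne_of_gt (hrest' q hq)))]
      simp
      omega
    have hcount_rest : ∀ q ∈ rest.dropWhile (fun q => q.2 == p.2),
        (p :: rest).countP (fun r => r.2 == q.2)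
          = (rest.dropWhile (fun r => r.2 == p.2)).countP (fun r => r.2 == q.2) := by
      intro q hq
      rw [hcount q.2, if_neg (ne_of_lt (hrest' q hq)),
        List.countP_eq_length_filter (l := rest.takeWhile _), List.filter_eq_nil_iff.2
          (fun r hr => by simp [hgrp r hr]; exact ne_of_lt (hrest' q hq))]
      simp
    rw [solutionRuns]
    simp only [List.mem_append]
    constructor
    · rintro (hin | hin)
      · split_ifs at hin with hc
        · rcases List.mem_map.1 hin with ⟨q, hq, rfl⟩
          have hq2 : q.2 = p.2 := by
            rcases List.mem_cons.1 hq with rfl | hqg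
            · rfl
            · exact hgrp q hqg
          refine ⟨q, ?_, rfl, ?_⟩
          · rcases List.mem_cons.1 hq with rfl | hqg
            · exact List.mem_cons_self
            · exact List.mem_cons_of_mem _ ((List.takeWhile_sublist _).mem hqg)
          · have : (fun r : Int × Int => r.2 == q.2) = (fun r => r.2 == p.2) := by
              funext r; rw [hq2]
            rw [this, hcount_head]
            push_cast
            omega
        · simp at hin
      · rcases (ih hs' i).1 hin with ⟨q, hq, rfl, hcnt⟩
        refine ⟨q, List.mem_cons_of_mem _ ((List.dropWhile_sublist _).mem hq), rfl, ?_⟩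
        rw [hcount_rest q hq]
        exact hcnt
    · rintro ⟨q, hq, rfl, hcnt⟩
      rcases List.mem_cons.1 hq with rfl | hqr
      · left
        rw [hcount_head] at hcnt
        rw [if_pos (by push_cast at hcnt ⊢; omega)]
        exact List.mem_map.2 ⟨q, List.mem_cons_self, rfl⟩
      · have hqr2 : q ∈ rest.takeWhile (fun r => r.2 == p.2) ++ rest.dropWhile (fun r => r.2 == p.2) := by
          rw [List.takeWhile_append_dropWhile]; exact hqr
        rcases List.mem_append.1 hqr2 with hqg | hqd
        · left
          have hq2 : (fun r : Int × Int => r.2 == q.2) = (fun r => r.2 == p.2) := by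
            funext r; rw [hgrp q hqg]
          rw [hq2, hcount_head] at hcnt
          rw [if_pos (by push_cast at hcnt ⊢; omega)]
          exact List.mem_map.2 ⟨q, List.mem_cons_of_mem _ hqg, rfl⟩
        · right
          exact (ih hs' q.1).2 ⟨q, hqd, rfl, by rw [← hcount_rest q hqd]; exact hcnt⟩

theorem countP_enumerate_eq_count (data : List Int) (v : Int) :
    (PySem.List.enumerate data 0).countP (fun q => q.2 == v) = data.count v := by
  conv_rhs => rw [← PySem.List.map_snd_enumerate data 0]
  rw [List.count_eq_countP, List.countP_map]
  rfl

-- the pair list B sorts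
theorem keep_facts (data : List Int) (n : Int) :
    (solutionRuns n (PySem.List.sorted (PySem.List.enumerate data 0) (·.2) false)).Nodup
    ∧ ∀ i : Int, i ∈ solutionRuns n (PySem.List.sorted (PySem.List.enumerate data 0) (·.2) false)
        ↔ i ∈ targetIdx data n := by
  have hperm : (PySem.List.sorted (PySem.List.enumerate data 0) (·.2) false).Perm
      (PySem.List.enumerate data 0) := PySem.List.sorted_perm _ _ _
  have hs : (PySem.List.sorted (PySem.List.enumerate data 0) (·.2) false).Pairwise
      (fun a b => a.2 ≤ b.2) := PySem.List.sorted_pairwise _ _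
  have hnodupfst : ((PySem.List.sorted (PySem.List.enumerate data 0) (·.2) false).map (·.1)).Nodup := by
    rw [(hperm.map (·.1)).nodup_iff, PySem.List.map_fst_enumerate]
    exact PySem.List.nodup_pyRange_one _ _
  constructor
  · exact (solutionRuns_sublist n _).nodup hnodupfst
  · intro i
    rw [mem_solutionRuns _ _ hs i, mem_targetIdx]
    constructor
    · rintro ⟨q, hq, rfl, hcnt⟩
      rcases (PySem.List.mem_enumerate_iff _ _ _).1 (hperm.mem_iff.1 hq) with ⟨k, hk, rfl⟩
      refine ⟨k, hk, by simp, ?_⟩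
      rwa [hperm.countP_eq, countP_enumerate_eq_count] at hcnt
    · rintro ⟨k, hk, rfl, hcnt⟩
      refine ⟨((k : Int), data[k]), hperm.mem_iff.2 ((PySem.List.mem_enumerate_iff _ _ _).2 ⟨k, hk, by simp⟩), rfl, ?_⟩
      rwa [hperm.countP_eq, countP_enumerate_eq_count]

-- sorted kept indices = targetIdx
theorem sorted_keep_eq (data : List Int) (n : Int) :
    PySem.List.sorted (solutionRuns n (PySem.List.sorted (PySem.List.enumerate data 0) (·.2) false))
      (fun i => i) false = targetIdx data n := by
  apply PySem.List.sorted_eq_of_perm_of_pairwise_lt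
  · exact (List.perm_ext_iff_of_nodup
      ((pairwise_lt_targetIdx data n).imp (fun h => ne_of_lt h)) (keep_facts data n).1).2
      (fun a => ((keep_facts data n).2 a).symm)
  · exact pairwise_lt_targetIdx data n

-- reading values back through targetIdx gives the filter
theorem map_get_targetIdx (data : List Int) (n : Int) :
    (targetIdx data n).map (fun i => PySem.List.pyGetD data i 0)
      = data.filter (fun x => ((data.count x : Int) ≤ n : Bool)) := by
  unfold targetIdx
  rw [List.map_map]
  have h1 : ((PySem.List.enumerate data 0).filter
        (fun p => ((data.count p.2 : Int) ≤ n : Bool))).map ((fun i => PySem.List.pyGetD data i 0) ∘ (·.1))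
      = ((PySem.List.enumerate data 0).filter
        (fun p => ((data.count p.2 : Int) ≤ n : Bool))).map (·.2) := by
    apply List.map_congr_left
    intro p hp
    rcases (PySem.List.mem_enumerate_iff _ _ _).1 (List.mem_of_mem_filter hp) with ⟨k, hk, rfl⟩
    simp [PySem.List.pyGetD_natCast, hk]
  have h2 : ∀ (c : Int → Bool), data.filter c
      = ((PySem.List.enumerate data 0).filter (fun p => c p.2)).map (·.2) := by
    intro c
    conv_lhs => rw [← PySem.List.map_snd_enumerate data 0]
    rw [List.filter_map]
    rfl
  rw [h1, h2 (fun x => ((data.count x : Int) ≤ n : Bool))]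

-- ===== VERDICT (by name: the statement is the Claim_ definition above) =====
theorem solution_spec : Claim_equal_solution := by
  intro data n _
  unfold Spec_solution
  simp only [solution_alt]
  rw [solution_eq_filter, sorted_keep_eq, map_get_targetIdx]
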